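-- pv_equiv track=rewrite | github.com/varaprasad6700/ds-algo | src/ds/reduce_array_size_to_half.py | reduce_arr_to_half_min_set
-- ===== SOURCE A (Python) =====
-- from collections import Counter
-- from typing import List
--
-- def reduce_arr_to_half_min_set(arr: List[int]) -> int:
--     store = Counter(arr)
--     original_len = len(arr)
--     n = len(arr)
--     out_ = 0
--     for i, count in store.most_common(original_len):
--         n = n - count
--         out_ += 1
--         if n <= original_len // 2:
--             break
--     return out_
-- ===== SOURCE B (Python) =====
-- def reduce_arr_to_half_min_set(arr):
--     if not arr:
--         return 0
--     freq = {}
--     for x in arr: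
--         freq[x] = freq.get(x, 0) + 1
--     counts = list(freq.values())
--     maxc = max(counts)
--     buckets = {}
--     for c in counts:
--         buckets[c] = buckets.get(c, 0) + 1
--     half = len(arr) // 2
--     n = len(arr)
--     out = 0
--     for c in range(maxc, 0, -1):
--         for _ in range(buckets.get(c, 0)):
--             n -= c
--             out += 1
--             if n <= half:
--                 return out
--     return out
-- ===== Notes on version B (the rewrite author's own statement) =====
-- stated objective: alternative
-- what changed: B replaces most_common's comparison sort of the frequency table with a counting-sort bucket table (buckets[c] = number of distinct values of frequency c) scanned from the maximum count downward, removing one distinct value at a time until half the array is gone.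
import Mathlib
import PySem

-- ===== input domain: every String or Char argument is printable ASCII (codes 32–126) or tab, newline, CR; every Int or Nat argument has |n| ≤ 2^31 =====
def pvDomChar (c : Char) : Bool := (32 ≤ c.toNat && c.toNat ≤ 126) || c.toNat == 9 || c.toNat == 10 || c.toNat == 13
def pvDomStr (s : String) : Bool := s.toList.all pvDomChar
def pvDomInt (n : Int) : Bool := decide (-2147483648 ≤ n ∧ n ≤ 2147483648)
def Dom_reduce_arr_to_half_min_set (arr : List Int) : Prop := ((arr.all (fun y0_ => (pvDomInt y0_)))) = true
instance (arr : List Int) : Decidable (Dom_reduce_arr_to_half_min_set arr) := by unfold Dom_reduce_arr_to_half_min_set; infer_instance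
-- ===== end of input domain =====

-- B replaces the comparison sort behind most_common with a counting-sort bucket table over frequencies scanned descending (objective: alternative algorithm, same measured cost).

-- ===== PORT A =====
-- the 'for i, count in …: … break' loop of A
def pvALoop (half : Int) : List (Int × Int) → Int → Int → Int
  | [], _, out_ => out_
  | (_, count) :: rest, n, out_ =>
      let n' := n - count
      if n' ≤ half then out_ + 1 else pvALoop half rest n' (out_ + 1)

-- store.most_common(original_len) = sorted(store.items(), key=count, reverse=True) since the
-- number of distinct values never exceeds original_len, so the .take is the identity and is omitted.
def reduce_arr_to_half_min_set (arr : List Int) : Int :=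
  let store := PySem.Dict.counter arr
  let originalLen : Int := arr.length
  let mc := PySem.List.sorted store.items (fun p => p.2) true
  pvALoop (PySem.Int.floordiv originalLen 2) mc originalLen 0

-- ===== PORT B =====
-- inner 'for _ in range(buckets.get(c, 0))' loop; .inr = early 'return out'
def pvBInner (half c : Int) : Nat → Int → Int → (Int × Int) ⊕ Int
  | 0, n, out_ => Sum.inl (n, out_)
  | Nat.succ k, n, out_ =>
      let n' := n - c
      if n' ≤ half then Sum.inr (out_ + 1) else pvBInner half c k n' (out_ + 1)

-- outer 'for c in range(maxc, 0, -1)' loop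
def pvBOuter (half : Int) (buckets : PySem.Dict Int Int) : Nat → Int → Int → Int
  | 0, _, out_ => out_
  | Nat.succ c, n, out_ =>
      match pvBInner half (Int.ofNat (c + 1)) ((buckets.getD (Int.ofNat (c + 1)) 0).toNat) n out_ with
      | Sum.inr r => r
      | Sum.inl (n', out') => pvBOuter half buckets c n' out'

def reduce_arr_to_half_min_set_alt (arr : List Int) : Int :=
  if arr = [] then 0 else
    let freq := arr.foldl (fun d x => d.insert x (d.getD x 0 + 1)) PySem.Dict.empty
    let counts := freq.values
    let maxc := (PySem.List.max? counts (fun y => y)).getD 0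
    let buckets := counts.foldl (fun d c => d.insert c (d.getD c 0 + 1)) PySem.Dict.empty
    pvBOuter (PySem.Int.floordiv (arr.length : Int) 2) buckets maxc.toNat (arr.length : Int) 0

-- ===== PRECONDITION & SPEC =====
def Spec_reduce_arr_to_half_min_set (arr : List Int) (out : Int) : Prop := out = reduce_arr_to_half_min_set_alt arr
instance (arr : List Int) (out : Int) : Decidable (Spec_reduce_arr_to_half_min_set arr out) := by unfold Spec_reduce_arr_to_half_min_set; infer_instance

-- ===== CLAIM (what is proved, stated in full; the proofs are below) =====
def Claim_equal_reduce_arr_to_half_min_set : Prop := ∀ (arr : List Int), Dom_reduce_arr_to_half_min_set arr → Spec_reduce_arr_to_half_min_set arr (reduce_arr_to_half_min_set arr)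

-- ===== LEMMAS AND PROOFS =====

-- the greedy loop over the bare list of counts (proof-only abstraction of both loops)
def pvLoopC (half : Int) : List Int → Int → Int → Int
  | [], _, out_ => out_
  | c :: rest, n, out_ =>
      let n' := n - c
      if n' ≤ half then out_ + 1 else pvLoopC half rest n' (out_ + 1)

theorem pvALoop_eq_loopC (half : Int) (l : List (Int × Int)) (n out_ : Int) :
    pvALoop half l n out_ = pvLoopC half (l.map (·.2)) n out_ := by
  induction l generalizing n out_ with
  | nil => rfl
  | cons p rest ih =>
      obtain ⟨a, b⟩ := p
      simp only [pvALoop, pvLoopC, List.map]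
      split_ifs <;> simp [ih]

-- the descending bucket expansion: counts c, c-1, …, 1, each repeated bk c times
def pvExpd (bk : Int → Nat) : Nat → List Int
  | 0 => []
  | Nat.succ c => List.replicate (bk (Int.ofNat (c + 1))) (Int.ofNat (c + 1)) ++ pvExpd bk c

theorem pvBInner_eq_loopC (half c : Int) (k : Nat) (rest : List Int) (n out_ : Int) :
    pvLoopC half (List.replicate k c ++ rest) n out_ =
      (match pvBInner half c k n out_ with
       | Sum.inr r => r
       | Sum.inl (n', out') => pvLoopC half rest n' out') := by
  induction k generalizing n out_ with
  | zero => rfl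
  | succ k ih =>
      simp only [List.replicate, List.cons_append, pvLoopC, pvBInner]
      split_ifs <;> simp [ih]

theorem pvBOuter_eq_loopC (half : Int) (buckets : PySem.Dict Int Int) (c : Nat) (n out_ : Int) :
    pvBOuter half buckets c n out_ =
      pvLoopC half (pvExpd (fun j => (buckets.getD j 0).toNat) c) n out_ := by
  induction c generalizing n out_ with
  | zero => rfl
  | succ c ih =>
      simp only [pvBOuter, pvExpd, pvBInner_eq_loopC]
      cases h : pvBInner half (Int.ofNat (c + 1)) ((buckets.getD (Int.ofNat (c + 1)) 0).toNat) n out_ with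
      | inr r => simp
      | inl p => obtain ⟨n', o'⟩ := p; simp [ih]

theorem pvMem_expd (bk : Int → Nat) (c : Nat) (x : Int) (hx : x ∈ pvExpd bk c) :
    1 ≤ x ∧ x ≤ (c : Int) := by
  induction c with
  | zero => simp [pvExpd] at hx
  | succ c ih =>
      simp only [pvExpd, List.mem_append, List.mem_replicate] at hx
      rcases hx with ⟨-, h⟩ | h
      · subst h; simp only [Int.ofNat_eq_natCast]; push_cast; omega
      · have := ih h; push_cast; push_cast at this; omega

theorem pvExpd_pairwise (bk : Int → Nat) (c : Nat) :
    (pvExpd bk c).Pairwise (fun a b => b ≤ a) := by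
  induction c with
  | zero => simp [pvExpd]
  | succ c ih =>
      simp only [pvExpd]
      refine List.pairwise_append.mpr ⟨?_, ih, ?_⟩
      · exact List.pairwise_replicate.mpr (Or.inr le_rfl)
      · intro x hx y hy
        have hx' := (List.mem_replicate.mp hx).2
        have hy' := pvMem_expd bk c y hy
        subst hx'
        simp only [Int.ofNat_eq_natCast]
        push_cast
        omega

theorem pvCount_expd (bk : Int → Nat) (c : Nat) (j : Int) :
    (pvExpd bk c).count j = if 1 ≤ j ∧ j ≤ (c : Int) then bk j else 0 := by
  induction c with
  | zero => simp [pvExpd]; omega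
  | succ c ih =>
      simp only [pvExpd, List.count_append, List.count_replicate, ih,
        Int.ofNat_eq_natCast, beq_iff_eq]
      push_cast
      by_cases hj : j = (c : Int) + 1
      · subst hj
        rw [if_pos rfl, if_neg (by omega), if_pos (by omega)]
        omega
      · rw [if_neg (fun h => hj h.symm)]
        by_cases h1 : 1 ≤ j ∧ j ≤ (c : Int)
        · rw [if_pos h1, if_pos ⟨h1.1, by omega⟩]
          omega
        · rw [if_neg h1, if_neg (by omega)]

theorem pvMem_values_counter (arr : List Int) (y : Int)
    (hy : y ∈ (PySem.Dict.counter arr).values) : ∃ k, k ∈ arr ∧ y = (arr.count k : Int) := by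
  simp only [PySem.Dict.values, PySem.Dict.items_counter, List.map_map, List.mem_map] at hy
  obtain ⟨k, hk, rfl⟩ := hy
  exact ⟨k, (PySem.Set.mem_ofList _ _).mp hk, rfl⟩

theorem pvCounts_eq (arr : List Int) (m : Int)
    (hm : PySem.List.max? ((PySem.Dict.counter arr).values) (fun y => y) = some m) :
    (PySem.List.sorted (PySem.Dict.counter arr).items (fun p => p.2) true).map (·.2)
      = pvExpd (fun j => ((PySem.Dict.counter ((PySem.Dict.counter arr).values)).getD j 0).toNat)
          m.toNat := by
  have hmmem : m ∈ (PySem.Dict.counter arr).values := PySem.List.max?_mem hm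
  have hm1 : 1 ≤ m := by
    obtain ⟨k, hk, rfl⟩ := pvMem_values_counter arr m hmmem
    have := List.count_pos_iff.mpr hk
    omega
  have hc : ((m.toNat : Nat) : Int) = m := Int.toNat_of_nonneg (by omega)
  have hbounds : ∀ y ∈ (PySem.Dict.counter arr).values, 1 ≤ y ∧ y ≤ m := by
    intro y hy
    refine ⟨?_, PySem.List.max?_isMax hm y hy⟩
    obtain ⟨k, hk, rfl⟩ := pvMem_values_counter arr y hy
    have := List.count_pos_iff.mpr hk
    omega
  refine List.Perm.eq_of_pairwise (le := fun a b : Int => b ≤ a)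
    (fun a b _ _ h1 h2 => le_antisymm h2 h1)
    (List.pairwise_map.mpr (PySem.List.sorted_pairwise_rev _ _))
    (pvExpd_pairwise _ _)
    ((((PySem.List.sorted_perm _ _ _)).map _).trans (List.perm_iff_count.mpr fun j => ?_).symm)
  rw [pvCount_expd, hc]
  by_cases h1 : 1 ≤ j ∧ j ≤ m
  · rw [if_pos h1]
    simp [PySem.Dict.getD_counter, PySem.Dict.values]
  · rw [if_neg h1]
    exact (List.count_eq_zero.mpr (fun hj => h1 (hbounds j hj))).symm

theorem reduce_arr_spec_aux (arr : List Int) :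
    reduce_arr_to_half_min_set arr = reduce_arr_to_half_min_set_alt arr := by
  by_cases he : arr = []
  · subst he; rfl
  · unfold reduce_arr_to_half_min_set reduce_arr_to_half_min_set_alt
    rw [if_neg he]
    simp only [PySem.Dict.foldl_insert_getD_add_one_eq_counter]
    rw [pvALoop_eq_loopC, pvBOuter_eq_loopC]
    obtain ⟨x, t, rfl⟩ : ∃ x t, arr = x :: t := by
      cases arr with
      | nil => exact absurd rfl he
      | cons x t => exact ⟨x, t, rfl⟩
    cases hm : PySem.List.max? ((PySem.Dict.counter (x :: t)).values) (fun y => y) with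
    | none =>
        exfalso
        have hv := (PySem.List.max?_eq_none_iff _ _).mp hm
        simp only [PySem.Dict.values, PySem.Dict.items_counter, List.map_map,
          List.map_eq_nil_iff] at hv
        have hx : x ∈ PySem.Set.ofList (x :: t) :=
          (PySem.Set.mem_ofList _ _).mpr (by simp)
        rw [hv] at hx
        simp at hx
    | some m =>
        simp only [Option.getD_some]
        congr 1
        exact pvCounts_eq (x :: t) m hm

-- ===== VERDICT (by name: the statement is the Claim_ definition above) =====
theorem reduce_arr_to_half_min_set_spec : Claim_equal_reduce_arr_to_half_min_set := by
  intro arr _hD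
  exact reduce_arr_spec_aux arr
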